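-- pv_equiv track=rewrite | github.com/chenzongyao200127/leetcode_in_rust | src/216_组合总和_III.py | maxLengthSubsequence
-- ===== SOURCE A (Python) =====
-- from typing import List
--
-- def maxLengthSubsequence(a: List[int], m: int) -> int:
--     n = len(a)
--     prefix_sum = [0] * (n + 1)
--     for i in range(1, n + 1):
--         prefix_sum[i] = prefix_sum[i-1] + a[i-1]
--
--     dp = [1] * n
--     ans = 1
--     for i in range(1, n):
--         for j in range(i):
--             if (prefix_sum[i+1] - prefix_sum[j]) >= m * (i - j + 1):
--                 dp[i] = max(dp[i], dp[j] + 1)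
--         ans = max(ans, dp[i])
--
--     return ans
-- ===== SOURCE B (Python) =====
-- def maxLengthSubsequence(a, m):
--     n = len(a)
--     if n <= 1:
--         return 1
--     q = [0]
--     s = 0
--     for k in range(1, n + 1):
--         s += a[k - 1]
--         q.append(s - m * k)
--     lo = min(q)
--     hi = max(q)
--     d = (hi - lo).bit_length()
--
--     # sparse max segment tree over positions [0, 2^d); node = (subtree_max, left, right)
--     def upd(node, dd, p, v):
--         w, l, r = node if node is not None else (0, None, None)
--         if dd == 0:
--             return (max(w, v), l, r)
--         h = 1 << (dd - 1)
--         if p < h: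
--             return (max(w, v), upd(l, dd - 1, p, v), r)
--         return (max(w, v), l, upd(r, dd - 1, p - h, v))
--
--     def tmax(node):
--         return 0 if node is None else node[0]
--
--     def pquery(node, dd, p):  # max value among positions < p (0 if none)
--         if p <= 0 or node is None:
--             return 0
--         w, l, r = node
--         if dd == 0:
--             return w
--         h = 1 << (dd - 1)
--         if p <= h:
--             return pquery(l, dd - 1, p)
--         return max(tmax(l), pquery(r, dd - 1, p - h))
--
--     tree = upd(None, d, q[0] - lo, 1)
--     ans = 1
--     for i in range(1, n):
--         di = 1 + pquery(tree, d, q[i + 1] - lo + 1)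
--         ans = max(ans, di)
--         tree = upd(tree, d, q[i] - lo, di)
--     return ans
-- ===== Notes on version B (the rewrite author's own statement) =====
-- stated objective: faster
-- what changed: The O(n^2) inner scan over all previous j is replaced by a prefix-maximum query on a sparse max segment tree keyed by the transformed prefix value q[k] = prefix_sum[k] - m*k (the condition avg >= m becomes q[j] <= q[i+1]), giving O(n log(range)).
import Mathlib
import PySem

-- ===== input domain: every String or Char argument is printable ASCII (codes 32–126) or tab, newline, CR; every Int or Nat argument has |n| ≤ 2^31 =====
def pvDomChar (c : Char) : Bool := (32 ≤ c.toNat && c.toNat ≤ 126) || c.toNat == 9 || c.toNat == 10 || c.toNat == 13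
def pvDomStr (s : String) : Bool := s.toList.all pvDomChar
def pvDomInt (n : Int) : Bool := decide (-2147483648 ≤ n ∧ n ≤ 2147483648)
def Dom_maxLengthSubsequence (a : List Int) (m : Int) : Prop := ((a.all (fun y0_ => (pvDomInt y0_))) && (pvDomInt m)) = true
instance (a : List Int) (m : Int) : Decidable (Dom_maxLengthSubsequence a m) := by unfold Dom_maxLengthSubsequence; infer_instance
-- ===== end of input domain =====

-- B replaces A's quadratic inner scan by a prefix-maximum query on a sparse max
-- segment tree keyed by q[k] = prefix_sum[k] - m*k (avg ≥ m ⟺ q[j] ≤ q[i+1]); the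
-- timing run measured B faster at the larger sizes.

-- ===== PORT A =====
-- Python: for i in range(1, n+1): prefix_sum[i] = prefix_sum[i-1] + a[i-1];
-- ported with the loop index shifted by one (i0 = i-1 runs over range n); all list
-- indices are in range in Python, so getD reads the same cells a[...] reads.
def maxLengthSubsequence (a : List Int) (m : Int) : Int :=
  let n := a.length
  let ps := (List.range n).foldl
      (fun ps i0 => ps.set (i0+1) (ps.getD i0 0 + a.getD i0 0))
      (List.replicate (n+1) (0:Int))
  -- for i in range(1, n): …  (i0 = i-1 runs over range (n-1))
  let st := (List.range (n-1)).foldl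
      (fun (st : List Int × Int) i0 =>
        let i := i0 + 1
        let dp := (List.range i).foldl
            (fun (dp : List Int) j =>
              if ps.getD (i+1) 0 - ps.getD j 0 ≥ m * ((i:Int) - (j:Int) + 1)
              then dp.set i (max (dp.getD i 0) (dp.getD j 0 + 1)) else dp)
            st.1
        (dp, max st.2 (dp.getD i 0)))
      (List.replicate n (1:Int), 1)
  st.2

-- ===== PORT B =====
-- sparse max segment tree (Python: nested tuples `(subtree_max, left, right)` / None)
inductive Seg where
  | nil : Seg
  | node : Int → Seg → Seg → Seg

def segTmax : Seg → Int
  | .nil => 0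
  | .node w _ _ => w

def segLeft : Seg → Seg
  | .nil => .nil
  | .node _ l _ => l

def segRight : Seg → Seg
  | .nil => .nil
  | .node _ _ r => r

-- Python upd(node, dd, p, v)
def segUpd (s : Seg) (dd : Nat) (p v : Int) : Seg :=
  let w := segTmax s
  let l := segLeft s
  let r := segRight s
  match dd with
  | 0 => .node (max w v) l r
  | d+1 =>
    let h : Int := 2^d
    if p < h then .node (max w v) (segUpd l d p v) r
    else .node (max w v) l (segUpd r d (p - h) v)

-- Python pquery(node, dd, p): max value among positions < p (0 if none)
def segPquery (s : Seg) (dd : Nat) (p : Int) : Int :=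
  if p ≤ 0 then 0
  else match s with
  | .nil => 0
  | .node w l r =>
    match dd with
    | 0 => w
    | d+1 =>
      let h : Int := 2^d
      if p ≤ h then segPquery l d p
      else max (segTmax l) (segPquery r d (p - h))

-- (hi-lo).bit_length() on the nonnegative int hi-lo is Nat.size of its toNat;
-- min(q)/max(q) on the nonempty q are PySem.List.min?/max? (getD 0 never fires).
def maxLengthSubsequence_alt (a : List Int) (m : Int) : Int :=
  let n := a.length
  if n ≤ 1 then 1 else
  let qs := (List.range n).foldl
      (fun (acc : List Int × Int) k0 =>
        let s := acc.2 + a.getD k0 0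
        (acc.1 ++ [s - m * ((k0:Int)+1)], s))
      ([0], 0)
  let q := qs.1
  let lo := (PySem.List.min? q (fun x => x)).getD 0
  let hi := (PySem.List.max? q (fun x => x)).getD 0
  let d := (hi - lo).toNat.size
  let tree := segUpd Seg.nil d (q.getD 0 0 - lo) 1
  let st := (List.range (n-1)).foldl
      (fun (st : Seg × Int) i0 =>
        let i := i0 + 1
        let di := 1 + segPquery st.1 d (q.getD (i+1) 0 - lo + 1)
        (segUpd st.1 d (q.getD i 0 - lo) di, max st.2 di))
      (tree, 1)
  st.2

-- ===== PRECONDITION & SPEC =====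
def Spec_maxLengthSubsequence (a : List Int) (m : Int) (out : Int) : Prop := out = maxLengthSubsequence_alt a m
instance (a : List Int) (m : Int) (out : Int) : Decidable (Spec_maxLengthSubsequence a m out) := by unfold Spec_maxLengthSubsequence; infer_instance

-- ===== CLAIM (what is proved, stated in full; the proofs are below) =====
def Claim_equal_maxLengthSubsequence : Prop := ∀ (a : List Int) (m : Int), Dom_maxLengthSubsequence a m → Spec_maxLengthSubsequence a m (maxLengthSubsequence a m)

-- ===== LEMMAS AND PROOFS =====

-- reference data: prefix sums, the transformed key q, the dp recurrence
def pvS (a : List Int) (k : Nat) : Int := (a.take k).sum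

def pvQ (a : List Int) (m : Int) (k : Nat) : Int := pvS a k - m * k

def pvInner (a : List Int) (m : Int) (i : Nat) (prev : List Int) : Int :=
  (List.range i).foldl
    (fun acc j => if pvQ a m j ≤ pvQ a m (i+1) then max acc (prev.getD j 0) else acc) 0

def pvDp (a : List Int) (m : Int) : Nat → List Int
  | 0 => []
  | i+1 => pvDp a m i ++ [1 + pvInner a m i (pvDp a m i)]

def pvDv (a : List Int) (m : Int) (j : Nat) : Int := (pvDp a m (j+1)).getD j 0

def pvAns (a : List Int) (m : Int) : Nat → Int
  | 0 => 1
  | t+1 => max (pvAns a m t) ((pvDp a m (t+2)).getD (t+1) 0)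

def pvTree (a : List Int) (m lo : Int) (d : Nat) (i : Nat) : Seg :=
  (List.range i).foldl (fun s j => segUpd s d (pvQ a m j - lo) (pvDv a m j)) Seg.nil

theorem pvDp_length (a : List Int) (m : Int) (i : Nat) : (pvDp a m i).length = i := by
  induction i with
  | zero => rfl
  | succ i ih => simp [pvDp, ih]

theorem pvDp_getD (a : List Int) (m : Int) {j i : Nat} (h : j < i) :
    (pvDp a m i).getD j 0 = pvDv a m j := by
  induction i with
  | zero => omega
  | succ i ih =>
    rcases Nat.lt_succ_iff_lt_or_eq.mp h with h' | h'
    · rw [pvDp, List.getD_append _ _ _ _ (by rw [pvDp_length]; exact h')]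
      exact ih h'
    · subst h'; rfl

-- A's dp[i] starting value 1 = 0+1 lifts out of the running max
theorem pvLiftOne (C : Nat → Prop) [DecidablePred C] (f : Nat → Int) :
    ∀ (L : List Nat) (c : Int),
      L.foldl (fun acc j => if C j then max acc (f j + 1) else acc) (c+1)
        = 1 + L.foldl (fun acc j => if C j then max acc (f j) else acc) c := by
  intro L
  induction L with
  | nil => intro c; simp [add_comm]
  | cons x L ih =>
    intro c
    by_cases hC : C x
    · simp only [List.foldl_cons, if_pos hC]
      rw [show max (c+1) (f x + 1) = (max c (f x)) + 1 from max_add_add_right c (f x) 1]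
      exact ih _
    · simp only [List.foldl_cons, if_neg hC]
      exact ih c

theorem pvGetD_append_len (X : List Int) (c : Int) (R : List Int) :
    (X ++ c :: R).getD X.length 0 = c := by
  rw [List.getD_append_right _ _ _ _ le_rfl]
  simp

theorem pvSet_append_len (X : List Int) (c v : Int) (R : List Int) {i : Nat}
    (h : i = X.length) : (X ++ c :: R).set i v = X ++ v :: R := by
  subst h
  rw [List.set_append]
  simp

theorem pvGetD_append_len' (X : List Int) (c : Int) (R : List Int) {i : Nat}
    (h : i = X.length) : (X ++ c :: R).getD i 0 = c := by
  subst h; exact pvGetD_append_len X c R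

theorem pvMapRange_getD (f : Nat → Int) {k j : Nat} (h : j < k) :
    ((List.range k).map f).getD j 0 = f j := by
  simp [List.getD_eq_getElem?_getD, h]

theorem pvS_succ (a : List Int) {t : Nat} (h : t < a.length) :
    pvS a (t+1) = pvS a t + a.getD t 0 := by
  unfold pvS
  rw [List.take_add_one, List.sum_append, List.getElem?_eq_getElem h]
  simp [List.getD_eq_getElem?_getD, List.getElem?_eq_getElem h]

-- the prefix-sum array A builds
theorem pvPs (a : List Int) :
    ∀ t ≤ a.length,
      (List.range t).foldl (fun ps i0 => ps.set (i0+1) (ps.getD i0 0 + a.getD i0 0))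
          (List.replicate (a.length+1) (0:Int))
        = (List.range (t+1)).map (pvS a) ++ List.replicate (a.length - t) 0 := by
  intro t
  induction t with
  | zero =>
    intro _
    have h0 : pvS a 0 = 0 := by simp [pvS]
    simp [h0, List.replicate_succ]
  | succ t ih =>
    intro ht
    rw [List.range_succ, List.foldl_append, ih (by omega)]
    simp only [List.foldl_cons, List.foldl_nil]
    have hlen : ((List.range (t+1)).map (pvS a)).length = t+1 := by simp
    have hrep : List.replicate (a.length - t) (0:Int)
        = 0 :: List.replicate (a.length - (t+1)) 0 := by
      rw [show a.length - t = (a.length - (t+1)) + 1 by omega, List.replicate_succ]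
    rw [hrep]
    rw [List.getD_append _ _ _ _ (by simp), pvMapRange_getD _ (by omega)]
    rw [pvSet_append_len _ _ _ _ hlen.symm]
    rw [show pvS a t + a.getD t 0 = pvS a (t+1) from (pvS_succ a (by omega)).symm]
    rw [show (List.range (t+1+1)) = List.range (t+1) ++ [t+1] from List.range_succ]
    simp

-- the q list B builds
theorem pvQs (a : List Int) (m : Int) :
    ∀ t ≤ a.length,
      (List.range t).foldl
          (fun (acc : List Int × Int) k0 =>
            (acc.1 ++ [(acc.2 + a.getD k0 0) - m * ((k0:Int)+1)], acc.2 + a.getD k0 0))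
          ([0], 0)
        = ((List.range (t+1)).map (pvQ a m), pvS a t) := by
  intro t
  induction t with
  | zero =>
    intro _
    have h0 : pvQ a m 0 = 0 := by simp [pvQ, pvS]
    have h1 : pvS a 0 = 0 := by simp [pvS]
    simp [h0, h1]
  | succ t ih =>
    intro ht
    rw [List.range_succ, List.foldl_append, ih (by omega)]
    simp only [List.foldl_cons, List.foldl_nil]
    have hs : pvS a t + a.getD t 0 = pvS a (t+1) := (pvS_succ a (by omega)).symm
    have hqv : pvS a (t+1) - m * ((t:Int)+1) = pvQ a m (t+1) := by
      unfold pvQ; push_cast; ring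
    rw [hs, hqv, show (List.range (t+1+1)) = List.range (t+1) ++ [t+1] from List.range_succ]
    simp

theorem segLeft_node (w : Int) (l r : Seg) : segLeft (Seg.node w l r) = l := rfl

theorem segRight_node (w : Int) (l r : Seg) : segRight (Seg.node w l r) = r := rfl

theorem segTmax_upd (s : Seg) (dd : Nat) (p v : Int) :
    segTmax (segUpd s dd p v) = max (segTmax s) v := by
  cases dd with
  | zero => simp [segUpd, segTmax]
  | succ d => unfold segUpd; by_cases h : p < (2:Int)^d <;> simp [h, segTmax]

theorem segPquery_nil (dd : Nat) (t : Int) : segPquery Seg.nil dd t = 0 := by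
  unfold segPquery; split <;> rfl

theorem segPquery_le (s : Seg) (dd : Nat) {t : Int} (h : t ≤ 0) :
    segPquery s dd t = 0 := by
  unfold segPquery; rw [if_pos h]

theorem segPquery_view0 (s : Seg) {t : Int} (h : ¬ t ≤ 0) :
    segPquery s 0 t = segTmax s := by
  cases s <;> unfold segPquery <;> rw [if_neg h] <;> rfl

theorem segPquery_view (s : Seg) (d : Nat) {t : Int} (h : ¬ t ≤ 0) :
    segPquery s (d+1) t
      = if t ≤ 2^d then segPquery (segLeft s) d t
        else max (segTmax (segLeft s)) (segPquery (segRight s) d (t - 2^d)) := by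
  cases s with
  | nil =>
    rw [segPquery_nil]
    split <;> simp [segLeft, segRight, segTmax, segPquery_nil]
  | node w l r =>
    conv_lhs => unfold segPquery
    rw [if_neg h]
    rfl

theorem segUpd_succ (s : Seg) (d : Nat) (p v : Int) :
    segUpd s (d+1) p v
      = if p < 2^d then .node (max (segTmax s) v) (segUpd (segLeft s) d p v) (segRight s)
        else .node (max (segTmax s) v) (segLeft s) (segUpd (segRight s) d (p - 2^d) v) := rfl

-- the single segment-tree lemma: how an update changes a prefix query
theorem segPquery_upd (dd : Nat) :
    ∀ (s : Seg) (p v t : Int), 0 ≤ p → p < 2^dd → t ≤ 2^dd →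
      segPquery (segUpd s dd p v) dd t
        = if p < t then max (segPquery s dd t) v else segPquery s dd t := by
  induction dd with
  | zero =>
    intro s p v t hp0 hp1 ht
    have h1 : (2:Int)^(0:Nat) = 1 := by norm_num
    have hp : p = 0 := by omega
    subst hp
    by_cases ht0 : t ≤ 0
    · rw [segPquery_le _ _ ht0, segPquery_le _ _ ht0, if_neg (by omega)]
    · rw [segPquery_view0 _ ht0, segPquery_view0 _ ht0, segTmax_upd,
        if_pos (by omega)]
  | succ d ih =>
    intro s p v t hp0 hp1 ht
    have hpow : (2:Int)^(d+1) = 2^d + 2^d := by ring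
    have hpd : (0:Int) < 2^d := by positivity
    by_cases ht0 : t ≤ 0
    · rw [segPquery_le _ _ ht0, segPquery_le _ _ ht0, if_neg (by omega)]
    · by_cases hpl : p < 2^d
      · rw [segUpd_succ, if_pos hpl]
        by_cases htl : t ≤ 2^d
        · rw [segPquery_view _ _ ht0, segPquery_view _ _ ht0, if_pos htl, if_pos htl,
            segLeft_node]
          exact ih (segLeft s) p v t hp0 hpl htl
        · rw [segPquery_view _ _ ht0, segPquery_view _ _ ht0, if_neg htl, if_neg htl,
            segLeft_node, segRight_node]
          rw [segTmax_upd, if_pos (by omega), max_right_comm]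
      · rw [segUpd_succ, if_neg hpl]
        by_cases htl : t ≤ 2^d
        · rw [segPquery_view _ _ ht0, segPquery_view _ _ ht0, if_pos htl, if_pos htl,
            segLeft_node]
          rw [if_neg (by omega)]
        · rw [segPquery_view _ _ ht0, segPquery_view _ _ ht0, if_neg htl, if_neg htl,
            segLeft_node, segRight_node]
          rw [ih (segRight s) (p - 2^d) v (t - 2^d) (by omega) (by omega) (by omega)]
          by_cases hpt : p < t
          · rw [if_pos (by omega), if_pos hpt, max_assoc]
          · rw [if_neg (by omega), if_neg hpt]

-- the tree after the first i inserts answers prefix queries as a scan over j < i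
theorem pvTree_query (a : List Int) (m lo : Int) (d : Nat) {n : Nat}
    (hb : ∀ j ≤ n, 0 ≤ pvQ a m j - lo ∧ pvQ a m j - lo < 2^d) :
    ∀ i ≤ n, ∀ t ≤ (2:Int)^d,
      segPquery (pvTree a m lo d i) d t
        = (List.range i).foldl
            (fun acc j => if pvQ a m j - lo < t then max acc (pvDv a m j) else acc) 0 := by
  intro i
  induction i with
  | zero => intro _ t _; simp [pvTree, segPquery_nil]
  | succ i ih =>
    intro hi t ht
    have hstep : pvTree a m lo d (i+1)
        = segUpd (pvTree a m lo d i) d (pvQ a m i - lo) (pvDv a m i) := by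
      unfold pvTree
      rw [List.range_succ, List.foldl_append]
      rfl
    rw [hstep,
      segPquery_upd d _ _ _ _ (hb i (by omega)).1 (hb i (by omega)).2 ht,
      List.range_succ, List.foldl_append]
    simp only [List.foldl_cons, List.foldl_nil]
    rw [ih (by omega) t ht]

-- A's inner-loop condition in terms of the transformed key q
theorem pvCond (a : List Int) (m : Int) (P : List Int)
    (hP : ∀ k ≤ a.length, P.getD k 0 = pvS a k) (i j : Nat)
    (hi : i+1 ≤ a.length) (hj : j ≤ a.length) :
    (P.getD (i+1) 0 - P.getD j 0 ≥ m * ((i:Int) - (j:Int) + 1))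
      ↔ pvQ a m j ≤ pvQ a m (i+1) := by
  rw [hP (i+1) hi, hP j hj]
  unfold pvQ
  have h : m * ((i:Int) - (j:Int) + 1) = m * (((i+1:Nat):Int)) - m * ((j:Nat):Int) := by
    push_cast; ring
  rw [ge_iff_le, h]
  constructor <;> intro hh <;> linarith

theorem pvLiftOne' (C : Nat → Prop) [DecidablePred C] (f : Nat → Int) (L : List Nat) :
    L.foldl (fun acc j => if C j then max acc (f j + 1) else acc) 1
      = 1 + L.foldl (fun acc j => if C j then max acc (f j) else acc) 0 := by
  simpa using pvLiftOne C f L 0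

-- A's inner loop only ever writes index i; the rest of the dp list rides along
theorem pvInnerLoop (P : List Int) (m : Int) (i : Nat) (X : List Int)
    (hX : i = X.length) (R : List Int) :
    ∀ (L : List Nat), (∀ j ∈ L, j < i) → ∀ (c : Int),
      L.foldl (fun dp j =>
          if P.getD (i+1) 0 - P.getD j 0 ≥ m * ((i:Int) - (j:Int) + 1)
          then dp.set i (max (dp.getD i 0) (dp.getD j 0 + 1)) else dp) (X ++ c :: R)
        = X ++ (L.foldl (fun acc j =>
            if P.getD (i+1) 0 - P.getD j 0 ≥ m * ((i:Int) - (j:Int) + 1)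
            then max acc (X.getD j 0 + 1) else acc) c) :: R := by
  intro L
  induction L with
  | nil => intro _ c; simp
  | cons j L ihL =>
    intro hmem c
    simp only [List.foldl_cons]
    by_cases hcond : P.getD (i+1) 0 - P.getD j 0 ≥ m * ((i:Int) - (j:Int) + 1)
    · rw [if_pos hcond, if_pos hcond]
      have hj : j < X.length := by rw [← hX]; exact hmem j (by simp)
      rw [pvGetD_append_len' X c R hX, List.getD_append _ _ _ _ hj,
        pvSet_append_len X c _ R hX]
      exact ihL (fun j' hj' => hmem j' (by simp [hj'])) _
    · rw [if_neg hcond, if_neg hcond]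
      exact ihL (fun j' hj' => hmem j' (by simp [hj'])) c

-- A's outer-loop state
theorem pvAstate (a : List Int) (m : Int) (P : List Int)
    (hP : ∀ k ≤ a.length, P.getD k 0 = pvS a k) (hn : 1 ≤ a.length) :
    ∀ t ≤ a.length - 1,
      (List.range t).foldl
          (fun (st : List Int × Int) i0 =>
            let i := i0 + 1
            let dp := (List.range i).foldl
                (fun (dp : List Int) j =>
                  if P.getD (i+1) 0 - P.getD j 0 ≥ m * ((i:Int) - (j:Int) + 1)
                  then dp.set i (max (dp.getD i 0) (dp.getD j 0 + 1)) else dp)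
                st.1
            (dp, max st.2 (dp.getD i 0)))
          (List.replicate a.length (1:Int), 1)
        = (pvDp a m (t+1) ++ List.replicate (a.length - (t+1)) 1, pvAns a m t) := by
  intro t
  induction t with
  | zero =>
    intro _
    have h1 : pvDp a m 1 = [1] := by simp [pvDp, pvInner]
    simp only [List.range_zero, List.foldl_nil, h1, pvAns]
    conv_lhs => rw [show a.length = (a.length - 1) + 1 by omega, List.replicate_succ]
    simp
  | succ t ih =>
    intro ht
    rw [List.range_succ, List.foldl_append, ih (by omega)]
    simp only [List.foldl_cons, List.foldl_nil]
    have hXlen : (pvDp a m (t+1)).length = t+1 := pvDp_length a m (t+1)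
    have hrep : List.replicate (a.length - (t+1)) (1:Int)
        = 1 :: List.replicate (a.length - (t+2)) 1 := by
      rw [show a.length - (t+1) = (a.length - (t+2)) + 1 by omega, List.replicate_succ]
    rw [hrep,
      pvInnerLoop P m (t+1) (pvDp a m (t+1)) hXlen.symm
        (List.replicate (a.length - (t+2)) 1) (List.range (t+1))
        (fun j hj => List.mem_range.mp hj) 1]
    have hval : (List.range (t+1)).foldl
        (fun acc j => if P.getD (t+1+1) 0 - P.getD j 0 ≥ m * (((t+1:Nat):Int) - (j:Int) + 1)
                      then max acc ((pvDp a m (t+1)).getD j 0 + 1) else acc) 1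
        = 1 + pvInner a m (t+1) (pvDp a m (t+1)) := by
      rw [PySem.List.foldl_congr_mem' _ _
          (fun acc j => if pvQ a m j ≤ pvQ a m (t+1+1)
                        then max acc ((pvDp a m (t+1)).getD j 0 + 1) else acc) 1
          (by
            intro j hj acc
            have hj' : j < t+1 := List.mem_range.mp hj
            have hc := pvCond a m P hP (t+1) j (by omega) (by omega)
            by_cases h : pvQ a m j ≤ pvQ a m (t+1+1)
            · rw [if_pos (hc.mpr h)]; simp [h]
            · rw [if_neg (fun hh => h (hc.mp hh))]; simp [h])]
      exact pvLiftOne' (fun j => pvQ a m j ≤ pvQ a m (t+1+1))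
        (fun j => (pvDp a m (t+1)).getD j 0) (List.range (t+1))
    rw [hval]
    have hdp2 : pvDp a m (t+2)
        = pvDp a m (t+1) ++ [1 + pvInner a m (t+1) (pvDp a m (t+1))] := rfl
    have hget : (pvDp a m (t+1) ++ (1 + pvInner a m (t+1) (pvDp a m (t+1)))
          :: List.replicate (a.length - (t+2)) 1).getD (t+1) 0
        = 1 + pvInner a m (t+1) (pvDp a m (t+1)) :=
      pvGetD_append_len' _ _ _ hXlen.symm
    have hans : pvAns a m (t+1)
        = max (pvAns a m t) (1 + pvInner a m (t+1) (pvDp a m (t+1))) := by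
      have hg2 : (pvDp a m (t+2)).getD (t+1) 0
          = 1 + pvInner a m (t+1) (pvDp a m (t+1)) := by
        rw [hdp2]; exact pvGetD_append_len' _ _ _ hXlen.symm
      rw [pvAns, hg2]
    rw [hget, hans, hdp2, List.append_assoc]
    rfl

theorem pvA_eq (a : List Int) (m : Int) (hn : 1 ≤ a.length) :
    maxLengthSubsequence a m = pvAns a m (a.length - 1) := by
  have hP : ∀ k ≤ a.length,
      ((List.range a.length).foldl (fun ps i0 => ps.set (i0+1) (ps.getD i0 0 + a.getD i0 0))
        (List.replicate (a.length+1) (0:Int))).getD k 0 = pvS a k := by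
    intro k hk
    rw [pvPs a a.length le_rfl]
    simp only [Nat.sub_self, List.replicate_zero, List.append_nil]
    exact pvMapRange_getD _ (by omega)
  have h := pvAstate a m _ hP hn (a.length - 1) le_rfl
  exact congrArg Prod.snd h

-- B's outer-loop state
theorem pvBstate (a : List Int) (m lo : Int) (d : Nat) (ql : List Int)
    (hq : ∀ k ≤ a.length, ql.getD k 0 = pvQ a m k)
    (hb : ∀ j ≤ a.length, 0 ≤ pvQ a m j - lo ∧ pvQ a m j - lo < 2^d)
    (hup : ∀ j ≤ a.length, pvQ a m j - lo + 1 ≤ 2^d) :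
    ∀ t ≤ a.length - 1,
      (List.range t).foldl
          (fun (st : Seg × Int) i0 =>
            let i := i0 + 1
            let di := 1 + segPquery st.1 d (ql.getD (i+1) 0 - lo + 1)
            (segUpd st.1 d (ql.getD i 0 - lo) di, max st.2 di))
          (segUpd Seg.nil d (ql.getD 0 0 - lo) 1, 1)
        = (pvTree a m lo d (t+1), pvAns a m t) := by
  intro t
  induction t with
  | zero =>
    intro _
    have h0 : pvDv a m 0 = 1 := by simp [pvDv, pvDp, pvInner]
    have h1 : pvTree a m lo d 1 = segUpd Seg.nil d (pvQ a m 0 - lo) 1 := by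
      rw [← h0]; simp [pvTree]
    simp only [List.range_zero, List.foldl_nil, h1, pvAns, hq 0 (by omega)]
  | succ t ih =>
    intro ht
    rw [List.range_succ, List.foldl_append, ih (by omega)]
    simp only [List.foldl_cons, List.foldl_nil]
    have hXlen : (pvDp a m (t+1)).length = t+1 := pvDp_length a m (t+1)
    have hdv : pvDv a m (t+1) = 1 + pvInner a m (t+1) (pvDp a m (t+1)) := by
      rw [pvDv, show pvDp a m (t+1+1)
        = pvDp a m (t+1) ++ [1 + pvInner a m (t+1) (pvDp a m (t+1))] from rfl]
      exact pvGetD_append_len' _ _ _ hXlen.symm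
    have hdi : 1 + segPquery (pvTree a m lo d (t+1)) d (ql.getD (t+1+1) 0 - lo + 1)
        = pvDv a m (t+1) := by
      rw [hq (t+1+1) (by omega),
        pvTree_query a m lo d hb (t+1) (by omega) _ (hup (t+1+1) (by omega)),
        PySem.List.foldl_congr_mem' _ _
          (fun acc j => if pvQ a m j ≤ pvQ a m (t+1+1)
                        then max acc ((pvDp a m (t+1)).getD j 0) else acc) 0
          (by
            intro j hj acc
            have hj' : j < t+1 := List.mem_range.mp hj
            rw [← pvDp_getD a m hj']
            by_cases h : pvQ a m j ≤ pvQ a m (t+1+1)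
            · rw [if_pos (by omega)]; simp [h]
            · rw [if_neg (by omega)]; simp [h]),
        hdv]
      rfl
    have htree : pvTree a m lo d (t+2)
        = segUpd (pvTree a m lo d (t+1)) d (pvQ a m (t+1) - lo) (pvDv a m (t+1)) := by
      unfold pvTree
      rw [List.range_succ, List.foldl_append]
      rfl
    have hans : pvAns a m (t+1) = max (pvAns a m t) (pvDv a m (t+1)) := by
      rw [pvAns, pvDv]
    rw [hdi, hq (t+1) (by omega), ← htree, ← hans]

theorem pvB_eq (a : List Int) (m : Int) (hn : 2 ≤ a.length) :
    maxLengthSubsequence_alt a m = pvAns a m (a.length - 1) := by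
  have hql := congrArg Prod.fst (pvQs a m a.length le_rfl)
  simp only at hql
  -- the concrete q list, lo, hi, depth of B's run
  set ql := ((List.range a.length).foldl
      (fun (acc : List Int × Int) k0 =>
        (acc.1 ++ [acc.2 + a.getD k0 0 - m * ((k0:Int)+1)], acc.2 + a.getD k0 0))
      ([0], 0)).1 with hqldef
  have hq : ∀ k ≤ a.length, ql.getD k 0 = pvQ a m k := by
    intro k hk
    rw [hql]
    exact pvMapRange_getD _ (by omega)
  have hne : ql ≠ [] := by
    rw [hql]
    simp
  obtain ⟨w, hw⟩ : ∃ w, PySem.List.min? ql (fun x => x) = some w := by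
    cases h : PySem.List.min? ql (fun x => x) with
    | none => exact absurd ((PySem.List.min?_eq_none_iff ql _).mp h) hne
    | some w => exact ⟨w, rfl⟩
  obtain ⟨z, hz⟩ : ∃ z, PySem.List.max? ql (fun x => x) = some z := by
    cases h : PySem.List.max? ql (fun x => x) with
    | none => exact absurd ((PySem.List.max?_eq_none_iff ql _).mp h) hne
    | some z => exact ⟨z, rfl⟩
  have hmem : ∀ k ≤ a.length, pvQ a m k ∈ ql := by
    intro k hk
    rw [hql]
    exact List.mem_map.mpr ⟨k, List.mem_range.mpr (by omega), rfl⟩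
  have hwle : ∀ k ≤ a.length, w ≤ pvQ a m k :=
    fun k hk => PySem.List.min?_isMin hw _ (hmem k hk)
  have hlez : ∀ k ≤ a.length, pvQ a m k ≤ z :=
    fun k hk => PySem.List.max?_isMax hz _ (hmem k hk)
  have hwz : w ≤ z := PySem.List.min?_isMin hw _ (PySem.List.max?_mem hz)
  have hzw : z - w < 2^((z - w).toNat.size) := by
    have h1 : ((z - w).toNat : Int) < ((2^((z - w).toNat.size) : Nat) : Int) := by
      exact_mod_cast Nat.lt_size_self (z - w).toNat
    rw [Int.toNat_of_nonneg (by omega)] at h1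
    rw [show ((2:Int)^((z - w).toNat.size)) = (((2^((z - w).toNat.size) : Nat)) : Int) by
      push_cast; rfl]
    exact h1
  have hb : ∀ j ≤ a.length, 0 ≤ pvQ a m j - w ∧ pvQ a m j - w < 2^((z - w).toNat.size) := by
    intro j hj
    have h1 := hwle j hj
    have h2 := hlez j hj
    constructor
    · omega
    · omega
  have hup : ∀ j ≤ a.length, pvQ a m j - w + 1 ≤ 2^((z - w).toNat.size) := by
    intro j hj
    have h2 := hlez j hj
    omega
  have h := pvBstate a m w ((z - w).toNat.size) ql hq hb hup (a.length - 1) le_rfl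
  have hget : (PySem.List.min? ql (fun x => x)).getD 0 = w := by rw [hw]; rfl
  have hgetz : (PySem.List.max? ql (fun x => x)).getD 0 = z := by rw [hz]; rfl
  simp only [maxLengthSubsequence_alt]
  rw [if_neg (by omega)]
  rw [← hqldef, hget, hgetz]
  exact congrArg Prod.snd h

-- ===== VERDICT (by name: the statement is the Claim_ definition above) =====
theorem maxLengthSubsequence_spec : Claim_equal_maxLengthSubsequence := by
  intro a m _
  unfold Spec_maxLengthSubsequence
  rcases a with _ | ⟨x, _ | ⟨y, t⟩⟩
  · rfl
  · rw [pvA_eq _ _ (by simp)]; rfl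
  · rw [pvA_eq _ _ (by simp), pvB_eq _ _ (by simp)]
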